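-- pv_equiv track=rewrite | github.com/ProjectsofSadia/Virtual-hiring-events | virtual-hiring-events/scripts/update_events.py | dedupe_sort_events
-- ===== SOURCE A (Python) =====
-- def dedupe_sort_events(events):
--     seen = set()
--     uniq = []
--     for e in events:
--         key = (e.get("url",""), e.get("date_iso",""), e.get("name",""))
--         if key in seen: continue
--         seen.add(key)
--         uniq.append(e)
--     uniq.sort(key=lambda x: (x.get("date_iso","9999-12-31"), x.get("name","")))
--     return uniq
-- ===== SOURCE B (Python) =====
-- def dedupe_sort_events(events):
--     # Dedupe by sorting: order (dedup-key, original index); within each key block the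
--     # leader (smallest index) is exactly the first occurrence A keeps.  Re-sort the
--     # surviving indices by (date_iso-or-sentinel, name, index): the index tiebreak
--     # reproduces stable-sort order, since first occurrences appear in index order.
--     decorated = sorted(
--         ((e.get("url", ""), e.get("date_iso", ""), e.get("name", "")), i)
--         for i, e in enumerate(events)
--     )
--     reps = []
--     prev = None
--     for k, i in decorated:
--         if k != prev:
--             reps.append(i)
--             prev = k
--     reps.sort(key=lambda i: (events[i].get("date_iso", "9999-12-31"),
--                              events[i].get("name", ""), i))
--     return [events[i] for i in reps]
-- ===== Notes on version B (the rewrite author's own statement) =====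
-- stated objective: alternative
-- what changed: B dedupes by sorting instead of hashing: it sorts (dedup-key, index) pairs, keeps the leader of each equal-key block (the first occurrence, by index tiebreak), then sorts the surviving indices by (date_iso, name, index), the index tiebreak reproducing A's stable-sort order; no seen-set at all.
import Mathlib
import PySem

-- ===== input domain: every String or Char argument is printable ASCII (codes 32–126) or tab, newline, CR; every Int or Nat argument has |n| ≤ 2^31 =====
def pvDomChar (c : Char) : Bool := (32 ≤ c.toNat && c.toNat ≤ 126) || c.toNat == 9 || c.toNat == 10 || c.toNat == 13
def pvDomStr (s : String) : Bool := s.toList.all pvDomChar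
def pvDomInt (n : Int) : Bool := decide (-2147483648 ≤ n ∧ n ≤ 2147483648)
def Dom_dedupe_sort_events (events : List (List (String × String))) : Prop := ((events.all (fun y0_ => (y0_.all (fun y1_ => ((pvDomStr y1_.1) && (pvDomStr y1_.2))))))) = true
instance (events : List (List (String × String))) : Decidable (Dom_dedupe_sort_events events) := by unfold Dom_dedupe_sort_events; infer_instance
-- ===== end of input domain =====

-- B dedupes by sorting (dedup-key, index) pairs and keeping each block's leader instead of A's
-- hash-set scan, then re-sorts the survivors with an index tiebreak; return values proved equal.

-- ===== PORT A =====
def dedupe_sort_events (events : List (List (String × String))) : List (List (String × String)) :=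
  let st := events.foldl
    (fun (st : PySem.Set (String × String × String) × List (List (String × String))) e =>
      let key := ((PySem.Dict.mk e).getD "url" "", (PySem.Dict.mk e).getD "date_iso" "", (PySem.Dict.mk e).getD "name" "")
      if PySem.Set.contains st.1 key then st
      else (PySem.Set.add st.1 key, st.2 ++ [e]))
    (PySem.Set.empty, [])
  PySem.List.sorted2 st.2 (fun x => (PySem.Dict.mk x).getD "date_iso" "9999-12-31")
    (fun x => (PySem.Dict.mk x).getD "name" "") false

-- ===== PORT B =====
-- Python compares the 2-tuple ((u,d,n), i) and the key 3-tuple (date, name, i)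
-- lexicographically; ported with sorted2 and single-level Lex pair keys, splitting the
-- same 4- resp. 3-component lexicographic order as ((u,d),(n,i)) and (date,(name,i)).
-- events[i] (index from enumerate, always in range, so pyGetD's default is never taken)
-- is PySem.List.pyGetD events i [].
def dedupe_sort_events_alt (events : List (List (String × String))) : List (List (String × String)) :=
  let decorated := (PySem.List.enumerate events 0).map (fun p =>
    (((PySem.Dict.mk p.2).getD "url" "", (PySem.Dict.mk p.2).getD "date_iso" "", (PySem.Dict.mk p.2).getD "name" ""), p.1))
  let sortedDec := PySem.List.sorted2 decorated
    (fun p => toLex (p.1.1, p.1.2.1)) (fun p => toLex (p.1.2.2, p.2)) false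
  let st := sortedDec.foldl
    (fun (st : List Int × Option (String × String × String)) p =>
      if st.2 ≠ some p.1 then (st.1 ++ [p.2], some p.1) else st) ([], none)
  let reps := PySem.List.sorted2 st.1
    (fun i => (PySem.Dict.mk (PySem.List.pyGetD events i [])).getD "date_iso" "9999-12-31")
    (fun i => toLex ((PySem.Dict.mk (PySem.List.pyGetD events i [])).getD "name" "", i)) false
  reps.map (fun i => PySem.List.pyGetD events i [])

-- ===== PRECONDITION & SPEC =====
def Spec_dedupe_sort_events (events : List (List (String × String))) (out : List (List (String × String))) : Prop := out = dedupe_sort_events_alt events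
instance (events : List (List (String × String))) (out : List (List (String × String))) : Decidable (Spec_dedupe_sort_events events out) := by unfold Spec_dedupe_sort_events; infer_instance

-- ===== CLAIM (what is proved, stated in full; the proofs are below) =====
def Claim_equal_dedupe_sort_events : Prop := ∀ (events : List (List (String × String))), Dom_dedupe_sort_events events → Spec_dedupe_sort_events events (dedupe_sort_events events)

-- ===== LEMMAS AND PROOFS =====

-- the dedup key (url, date_iso, name) with empty-string defaults
def pvK (e : List (String × String)) : String × String × String :=
  ((PySem.Dict.mk e).getD "url" "", (PySem.Dict.mk e).getD "date_iso" "", (PySem.Dict.mk e).getD "name" "")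

-- the dedup key under Python's 3-tuple (lexicographic) order
def pvT (k : String × String × String) : Lex (String × Lex (String × String)) :=
  toLex (k.1, toLex (k.2.1, k.2.2))

-- the sort key (date_iso or "9999-12-31", name or ""), compared lexicographically
def pvS (e : List (String × String)) : Lex (String × String) :=
  toLex ((PySem.Dict.mk e).getD "date_iso" "9999-12-31", (PySem.Dict.mk e).getD "name" "")

def pvEv (events : List (List (String × String))) (i : Int) : List (String × String) :=
  PySem.List.pyGetD events i []

-- B's decoration key and final key
def pvDK (p : (String × String × String) × Int) : Lex (Lex (String × Lex (String × String)) × Int) :=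
  toLex (pvT p.1, p.2)
def pvMK (p : Int × List (String × String)) : Lex (Lex (String × String) × Int) :=
  toLex (pvS p.2, p.1)

-- first-occurrence pairs: (index, event) whose index is minimal for its dedup key
abbrev pvMin (events : List (List (String × String))) (p : Int × List (String × String)) : Prop :=
  ∀ q ∈ PySem.List.enumerate events 0, pvK q.2 = pvK p.2 → p.1 ≤ q.1
def pvG (events : List (List (String × String))) : List (Int × List (String × String)) :=
  (PySem.List.enumerate events 0).filter (fun p => decide (pvMin events p))

-- first-occurrence dedupe with an explicit seen-list: the shape of A's loop
def pvDD (seen : List (String × String × String)) : List (List (String × String)) → List (List (String × String))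
  | [] => []
  | e :: l => if pvK e ∈ seen then pvDD seen l else e :: pvDD (seen ++ [pvK e]) l

theorem pvT_inj (a b : String × String × String) (h : pvT a = pvT b) : a = b := by
  unfold pvT at h
  have h1 := toLex.injective h
  have h2 := congrArg (fun x => x.2) h1
  have h3 := toLex.injective h2
  obtain ⟨a1, a2, a3⟩ := a; obtain ⟨b1, b2, b3⟩ := b
  simp_all [Prod.ext_iff]

theorem pvDK_lt {a b : (String × String × String) × Int} (h : pvDK a < pvDK b) :
    pvT a.1 < pvT b.1 ∨ (a.1 = b.1 ∧ a.2 < b.2) := by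
  unfold pvDK at h
  rw [Prod.Lex.lt_iff] at h
  simp only [ofLex_toLex] at h
  rcases h with h | ⟨he, h⟩
  · exact Or.inl h
  · exact Or.inr ⟨pvT_inj _ _ he, h⟩

theorem pvDD_congr (s1 s2 : List (String × String × String)) (l : List (List (String × String)))
    (h : ∀ e ∈ l, (pvK e ∈ s1 ↔ pvK e ∈ s2)) : pvDD s1 l = pvDD s2 l := by
  induction l generalizing s1 s2 with
  | nil => rfl
  | cons e l ih =>
    have he := h e (List.mem_cons_self ..)
    by_cases hm : pvK e ∈ s1
    · rw [pvDD, pvDD, if_pos hm, if_pos (he.mp hm)]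
      exact ih s1 s2 (fun x hx => h x (List.mem_cons_of_mem _ hx))
    · rw [pvDD, pvDD, if_neg hm, if_neg (fun c => hm (he.mpr c))]
      refine congrArg _ (ih _ _ (fun x hx => ?_))
      simp only [List.mem_append, List.mem_singleton]
      exact or_congr (h x (List.mem_cons_of_mem _ hx)) Iff.rfl

theorem pvDD_append (s : List (String × String × String)) (u v : List (List (String × String))) :
    pvDD s (u ++ v) = pvDD s u ++ pvDD (s ++ u.map pvK) v := by
  induction u generalizing s with
  | nil => simp [pvDD]
  | cons e u ih =>
    by_cases hm : pvK e ∈ s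
    · rw [List.cons_append, pvDD, if_pos hm, pvDD, if_pos hm, ih]
      refine congrArg _ (pvDD_congr _ _ _ (fun x _ => ?_))
      simp only [List.map_cons, List.mem_append, List.mem_cons]
      constructor
      · rintro (h | h); exacts [Or.inl h, Or.inr (Or.inr h)]
      · rintro (h | h | h); exacts [Or.inl h, Or.inl (h ▸ hm), Or.inr h]
    · rw [List.cons_append, pvDD, if_neg hm, pvDD, if_neg hm, ih, List.cons_append]
      refine congrArg _ (congrArg _ (pvDD_congr _ _ _ (fun x _ => ?_)))
      simp [List.append_assoc]

-- A's concrete dedupe loop is pvDD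
theorem pvFold_eq_pvDD (l : List (List (String × String))) (s : PySem.Set (String × String × String))
    (acc : List (List (String × String))) :
    (l.foldl
      (fun (st : PySem.Set (String × String × String) × List (List (String × String))) e =>
        let key := ((PySem.Dict.mk e).getD "url" "", (PySem.Dict.mk e).getD "date_iso" "", (PySem.Dict.mk e).getD "name" "")
        if PySem.Set.contains st.1 key then st
        else (PySem.Set.add st.1 key, st.2 ++ [e]))
      (s, acc)).2 = acc ++ pvDD s l := by
  induction l generalizing s acc with
  | nil => simp [pvDD]
  | cons e l ih =>
    simp only [List.foldl_cons]
    rw [show ((PySem.Dict.mk e).getD "url" "", (PySem.Dict.mk e).getD "date_iso" "", (PySem.Dict.mk e).getD "name" "") = pvK e from rfl]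
    by_cases hm : pvK e ∈ s
    · have hc : PySem.Set.contains s (pvK e) = true := (PySem.Set.contains_iff s _).mpr hm
      rw [pvDD, if_pos hm, hc, if_pos rfl, ih]
    · have hc : PySem.Set.contains s (pvK e) = false := by
        rw [PySem.Set.contains_eq_listContains]; simpa using hm
      have hadd : PySem.Set.add s (pvK e) = s ++ [pvK e] := PySem.Set.add_of_not_mem hm
      rw [pvDD, if_neg hm, hc, if_neg (by simp), hadd, ih, List.append_assoc]
      rfl

theorem pvFoldl_insertBy_congr {α : Type} (b1 b2 : α → α → Bool) (h : b1 = b2) (xs : List α) :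
    xs.foldl (fun acc x => PySem.List.insertBy b1 x acc) [] = xs.foldl (fun acc x => PySem.List.insertBy b2 x acc) [] := by
  rw [h]

-- sorted2 with two linearly ordered keys is sorted with the lexicographic pair key
theorem pvSorted2_eq {α κ₁ κ₂ : Type} [LinearOrder κ₁] [LinearOrder κ₂]
    (xs : List α) (f : α → κ₁) (g : α → κ₂) :
    PySem.List.sorted2 xs f g false = PySem.List.sorted xs (fun x => toLex (f x, g x)) false := by
  rw [PySem.List.sorted_eq_foldl_insertBy]
  show xs.foldl (fun acc x => PySem.List.insertBy
      (fun a b => decide (f a < f b) || (!decide (f b < f a) && decide (g a < g b))) x acc) [] = _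
  apply pvFoldl_insertBy_congr
  funext a b
  rcases lt_trichotomy (f a) (f b) with h | h | h
  · simp [h, asymm h, Prod.Lex.lt_iff]
  · simp [h, Prod.Lex.lt_iff]
  · simp [Prod.Lex.lt_iff, asymm h, h.ne']
    intro hle
    exact absurd (lt_of_lt_of_le h hle) (lt_irrefl _)

-- C1: A's dedupe keeps exactly the min-index representative of every dedup key, in index order
theorem pvC1 (events : List (List (String × String))) :
    pvDD [] events = (pvG events).map (fun p => p.2) := by
  induction events using List.reverseRecOn with
  | nil => rfl
  | append_singleton l x ih =>
    rw [pvDD_append, List.nil_append]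
    unfold pvG
    have hx : PySem.List.enumerate [x] ((0:Int) + l.length) = [(((0:Int) + l.length), x)] := by
      rw [PySem.List.enumerate_cons]; rfl
    simp only [PySem.List.enumerate_append, hx, List.filter_append]
    -- the old entries keep their min-status: the new index is larger than all of them
    have hfilter : (PySem.List.enumerate l 0).filter
        (fun p => decide (pvMin (l ++ [x]) p)) = (PySem.List.enumerate l 0).filter
        (fun p => decide (pvMin l p)) := by
      apply List.filter_congr
      intro p hp
      simp only [decide_eq_decide]
      obtain ⟨k, hk, rfl⟩ := (PySem.List.mem_enumerate_iff _ _ _).mp hp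
      unfold pvMin
      rw [PySem.List.enumerate_append, hx]
      constructor
      · intro h q hq he; exact h q (List.mem_append_left _ hq) he
      · intro h q hq he
        rcases List.mem_append.mp hq with hq | hq
        · exact h q hq he
        · rw [List.mem_singleton.mp hq]
          have : (k:Int) < (l.length:Int) := by exact_mod_cast hk
          omega
    rw [hfilter, List.map_append, ih]
    congr 1
    -- the new entry survives iff its key is fresh
    have hmem : ∀ q ∈ PySem.List.enumerate l 0, q.1 < (0:Int) + l.length := by
      intro q hq
      obtain ⟨k, hk, rfl⟩ := (PySem.List.mem_enumerate_iff _ _ _).mp hq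
      have : (k:Int) < (l.length:Int) := by exact_mod_cast hk
      omega
    by_cases hdup : pvK x ∈ l.map pvK
    · -- a previous occurrence exists: dropped on both sides
      have : ¬ pvMin (l ++ [x]) (((0:Int) + l.length), x) := by
        obtain ⟨e, he, hke⟩ := List.mem_map.mp hdup
        have : ∃ q ∈ PySem.List.enumerate l 0, q.2 = e := by
          have := PySem.List.map_snd_enumerate l 0
          obtain ⟨q, hq, hqe⟩ := List.mem_map.mp (this ▸ he)
          exact ⟨q, hq, hqe⟩
        obtain ⟨q, hq, hqe⟩ := this
        intro hmin
        have := hmin q (by rw [PySem.List.enumerate_append, hx]; exact List.mem_append_left _ hq)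
          (by rw [hqe, hke])
        exact absurd this (not_le.mpr (hmem q hq))
      rw [List.filter_cons_of_neg (by simpa using this), pvDD, if_pos hdup]
      rfl
    · have : pvMin (l ++ [x]) (((0:Int) + l.length), x) := by
        intro q hq he
        rw [PySem.List.enumerate_append, hx] at hq
        rcases List.mem_append.mp hq with hq | hq
        · exfalso
          apply hdup
          have hsnd : q.2 ∈ l := by
            have := PySem.List.map_snd_enumerate l 0
            exact this ▸ List.mem_map.mpr ⟨q, hq, rfl⟩
          exact List.mem_map.mpr ⟨q.2, hsnd, he⟩
        · rw [List.mem_singleton.mp hq]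
      rw [List.filter_cons_of_pos (by simpa using this), pvDD, if_neg hdup]
      rfl

-- insertBy commutes with map when the comparison factors through the map
theorem pvInsertBy_map {α β : Type} (g : α → β) (c : β → β → Bool) (x : α) (l : List α) :
    (PySem.List.insertBy (fun a b => c (g a) (g b)) x l).map g
      = PySem.List.insertBy c (g x) (l.map g) := by
  induction l with
  | nil => rfl
  | cons y t ih =>
    by_cases h : c (g x) (g y)
    · simp [PySem.List.insertBy, h]
    · simp [PySem.List.insertBy, h, ih]

-- sorted commutes with map when the key factors through the map
theorem pvSorted_map {α β κ : Type} [LinearOrder κ] (g : α → β) (k : β → κ) (l : List α) :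
    (PySem.List.sorted l (fun a => k (g a)) false).map g
      = PySem.List.sorted (l.map g) k false := by
  induction l using List.reverseRecOn with
  | nil => rfl
  | append_singleton t x ih =>
    rw [List.map_append, PySem.List.sorted_eq_foldl_insertBy, PySem.List.sorted_eq_foldl_insertBy,
      List.foldl_append, List.foldl_append]
    simp only [List.map_cons, List.map_nil, List.foldl_cons, List.foldl_nil]
    rw [← PySem.List.sorted_eq_foldl_insertBy, ← PySem.List.sorted_eq_foldl_insertBy, ← ih]
    exact pvInsertBy_map g (fun a b => decide (k a < k b)) x _

-- stability via decoration: inserting a pair whose tag exceeds all present tags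
theorem pvInsStab {α κ : Type} [LinearOrder κ] (f : α → κ) (x : α) (n : Int)
    (S : List (Int × α)) (h : ∀ p ∈ S, p.1 < n) :
    (PySem.List.insertBy (fun a b => decide (toLex (f a.2, a.1) < toLex (f b.2, b.1))) (n, x) S).map (fun p => p.2)
      = PySem.List.insertBy (fun a b => decide (f a < f b)) x (S.map (fun p => p.2)) := by
  induction S with
  | nil => rfl
  | cons q t ih =>
    have hq : q.1 < n := h q (List.mem_cons_self ..)
    have hc : (decide (toLex (f x, n) < toLex (f q.2, q.1))) = decide (f x < f q.2) := by
      simp only [Prod.Lex.lt_iff, ofLex_toLex, decide_eq_decide]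
      constructor
      · rintro (h' | ⟨-, h'⟩)
        · exact h'
        · omega
      · exact Or.inl
    by_cases hx : f x < f q.2
    · rw [PySem.List.insertBy, List.map_cons, PySem.List.insertBy, hc]
      simp [hx]
    · rw [List.map_cons, PySem.List.insertBy, PySem.List.insertBy, hc]
      simp only [hx, decide_false, Bool.false_eq_true, if_false, List.map_cons]
      rw [ih (fun p hp => h p (List.mem_cons_of_mem _ hp))]

-- STABILITY: sorting index-tagged pairs (tags increasing) by (key, tag) and dropping tags
-- is the stable sort by key
theorem pvStab {α κ : Type} [LinearOrder κ] (f : α → κ) (ps : List (Int × α))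
    (hp : ps.Pairwise (fun a b => a.1 < b.1)) :
    (PySem.List.sorted ps (fun p => toLex (f p.2, p.1)) false).map (fun p => p.2)
      = PySem.List.sorted (ps.map (fun p => p.2)) f false := by
  induction ps using List.reverseRecOn with
  | nil => rfl
  | append_singleton t p ih =>
    rw [List.pairwise_append] at hp
    obtain ⟨n, x⟩ := p
    rw [List.map_append, PySem.List.sorted_eq_foldl_insertBy, PySem.List.sorted_eq_foldl_insertBy,
      List.foldl_append, List.foldl_append]
    simp only [List.map_cons, List.map_nil, List.foldl_cons, List.foldl_nil]
    rw [← PySem.List.sorted_eq_foldl_insertBy, ← PySem.List.sorted_eq_foldl_insertBy, ← ih hp.1]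
    exact pvInsStab f x n _ (fun q hq =>
      hp.2.2 q ((PySem.List.mem_sorted _ _ _ _).mp hq) (n, x) (List.mem_singleton.mpr rfl))

-- a pairwise-≤ list whose keys are injective up to a Nodup component is pairwise-<
theorem pvPairwiseLt {γ κ : Type} [LinearOrder κ] (key : γ → κ) (idx : γ → Int)
    (hinj : ∀ a b, key a = key b → idx a = idx b) (l : List γ)
    (h1 : l.Pairwise (fun a b => key a ≤ key b)) (h2 : (l.map idx).Nodup) :
    l.Pairwise (fun a b => key a < key b) := by
  rw [List.nodup_iff_pairwise_ne, List.pairwise_map] at h2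
  exact (h1.and h2).imp (fun h => lt_of_le_of_ne h.1 (fun he => h.2 (hinj _ _ he)))

-- C2: the adjacent-distinct scan over the lex-sorted decorated list keeps exactly
-- the min-index entry of every key block
theorem pvScan (S : List ((String × String × String) × Int))
    (hS : S.Pairwise (fun a b => pvDK a < pvDK b)) :
    ∀ (done l : List ((String × String × String) × Int)), S = done ++ l → ∀ (acc : List Int),
    (l.foldl (fun (st : List Int × Option (String × String × String)) p =>
        if st.2 ≠ some p.1 then (st.1 ++ [p.2], some p.1) else st)
      (acc, (done.getLast?).map (fun r => r.1))).1
    = acc ++ (l.filter (fun p => decide (∀ q ∈ S, q.1 = p.1 → p.2 ≤ q.2))).map (fun p => p.2) := by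
  intro done l
  induction l generalizing done with
  | nil => intro _ acc; simp
  | cons p t ih =>
    intro hSdl acc
    have hsplit := hS
    rw [hSdl, List.pairwise_append] at hsplit
    obtain ⟨hdone, hpt, hcross⟩ := hsplit
    rw [List.pairwise_cons] at hpt
    -- the head is kept iff it is the min-index entry of its key in S
    have hmin_of_t : ∀ q ∈ t, q.1 = p.1 → p.2 ≤ q.2 := by
      intro q hq he
      rcases pvDK_lt (hpt.1 q hq) with h | ⟨-, h⟩
      · exact absurd (he ▸ rfl) (fun hh : pvT q.1 = pvT p.1 => absurd (hh ▸ h) (lt_irrefl _))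
      · exact le_of_lt h
    have key_iff : ((done.getLast?).map (fun r => r.1) ≠ some p.1)
        ↔ (∀ q ∈ S, q.1 = p.1 → p.2 ≤ q.2) := by
      cases hdl : done.getLast? with
      | none =>
        rw [List.getLast?_eq_none_iff] at hdl
        subst hdl
        simp only [Option.map_none]
        constructor
        · intro _ q hq he
          rw [hSdl, List.nil_append, List.mem_cons] at hq
          rcases hq with rfl | hq
          · exact le_refl _
          · exact hmin_of_t q hq he
        · intro _ h; simp at h
      | some r =>
        have hrd : r ∈ done := List.mem_of_getLast? hdl
        have hrmax : ∀ q ∈ done, pvDK q ≤ pvDK r := by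
          intro q hq
          have hne : done ≠ [] := by rintro rfl; simp at hdl
          have := List.dropLast_concat_getLast hne
          have hr : done.getLast hne = r := by
            rw [List.getLast?_eq_some_getLast hne] at hdl; injection hdl
          rcases (by rw [← this, hr] at hq; exact List.mem_append.mp hq) with h | h
          · have hd2 := hdone
            rw [← this, hr, List.pairwise_append] at hd2
            exact le_of_lt (hd2.2.2 q h r (List.mem_singleton.mpr rfl))
          · rw [List.mem_singleton.mp h]
        have hrp : pvDK r < pvDK p := hcross r hrd p (List.mem_cons_self ..)
        simp only [Option.map_some, ne_eq, Option.some_inj]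
        constructor
        · -- r.1 ≠ p.1 → min
          intro hne q hq he
          rw [hSdl] at hq
          rcases List.mem_append.mp hq with hq | hq
          · -- q ∈ done with q.1 = p.1 is impossible
            exfalso
            have h1 : pvDK q ≤ pvDK r := hrmax q hq
            have h2 : pvT q.1 ≤ pvT r.1 := by
              unfold pvDK at h1; rw [Prod.Lex.le_iff] at h1
              simp only [ofLex_toLex] at h1
              rcases h1 with h | ⟨h, -⟩
              · exact le_of_lt h
              · exact le_of_eq h
            have h3 : pvT r.1 ≤ pvT p.1 := by
              rcases pvDK_lt hrp with h | ⟨h, -⟩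
              · exact le_of_lt h
              · exact le_of_eq (h ▸ rfl)
            have : pvT r.1 = pvT p.1 := le_antisymm h3 (he ▸ h2)
            exact hne (pvT_inj _ _ this)
          · rcases List.mem_cons.mp hq with rfl | hq
            · exact le_refl _
            · exact hmin_of_t q hq he
        · -- min → r.1 ≠ p.1
          intro hmin hre
          have hrS : r ∈ S := hSdl ▸ List.mem_append_left _ hrd
          have := hmin r hrS hre
          rcases pvDK_lt hrp with h | ⟨-, h⟩
          · rw [hre] at h; exact absurd h (lt_irrefl _)
          · omega
    by_cases hcond : (∀ q ∈ S, q.1 = p.1 → p.2 ≤ q.2)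
    · have hb : ((done.getLast?).map (fun r => r.1) ≠ some p.1) := key_iff.mpr hcond
      rw [List.foldl_cons, if_pos hb, List.filter_cons_of_pos (by simpa using hcond), List.map_cons]
      have := ih (done ++ [p]) (by rw [hSdl, List.append_assoc]; rfl) (acc ++ [p.2])
      rw [List.getLast?_concat] at this
      simpa [List.append_assoc] using this
    · have hb : ¬ ((done.getLast?).map (fun r => r.1) ≠ some p.1) := fun h => hcond (key_iff.mp h)
      rw [List.foldl_cons, if_neg hb, List.filter_cons_of_neg (by simpa using hcond)]
      have := ih (done ++ [p]) (by rw [hSdl, List.append_assoc]; rfl) acc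
      rw [List.getLast?_concat] at this
      rw [← this]
      simp only [ne_eq, Decidable.not_not] at hb
      rw [hb]
      rfl

def pvGev (events : List (List (String × String))) (i : Int) : Int × List (String × String) :=
  (i, pvEv events i)

theorem pvG_pairwise (events : List (List (String × String))) :
    (pvG events).Pairwise (fun a b => a.1 < b.1) :=
  (PySem.List.pairwise_lt_enumerate events 0).sublist (List.filter_sublist)

-- A's output is the (index-decorated, hence order-pinned) sort of the first occurrences
theorem pvA_eq (events : List (List (String × String))) :
    dedupe_sort_events events
      = (PySem.List.sorted (pvG events) pvMK false).map (fun p => p.2) := by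
  unfold dedupe_sort_events
  simp only
  rw [pvFold_eq_pvDD, List.nil_append, pvSorted2_eq,
    show (PySem.Set.empty : List (String × String × String)) = [] from rfl, pvC1]
  rw [show (fun x => toLex ((PySem.Dict.mk x).getD "date_iso" "9999-12-31", (PySem.Dict.mk x).getD "name" "")) = pvS from rfl]
  rw [← pvStab pvS (pvG events) (pvG_pairwise events)]
  rfl

-- compact names for B's pipeline stages
def pvDec (events : List (List (String × String))) : List ((String × String × String) × Int) :=
  (PySem.List.enumerate events 0).map (fun p => (pvK p.2, p.1))
def pvSD (events : List (List (String × String))) : List ((String × String × String) × Int) :=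
  PySem.List.sorted (pvDec events) pvDK false
def pvCdec (events : List (List (String × String))) (p : (String × String × String) × Int) : Bool :=
  decide (∀ q ∈ pvDec events, q.1 = p.1 → p.2 ≤ q.2)
def pvReps (events : List (List (String × String))) : List Int :=
  ((pvSD events).filter (pvCdec events)).map (fun p => p.2)

-- two keys inducing the same strict comparisons sort identically
theorem pvSortedKeyCongr {α κ₁ κ₂ : Type} [LinearOrder κ₁] [LinearOrder κ₂]
    (xs : List α) (k1 : α → κ₁) (k2 : α → κ₂) (h : ∀ a b, k1 a < k1 b ↔ k2 a < k2 b) :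
    PySem.List.sorted xs k1 false = PySem.List.sorted xs k2 false := by
  rw [PySem.List.sorted_eq_foldl_insertBy, PySem.List.sorted_eq_foldl_insertBy]
  apply pvFoldl_insertBy_congr
  funext a b
  exact decide_eq_decide.mpr (h a b)

-- the split pair key of B's decoration sort orders exactly like pvDK
theorem pvDK_bridge (a b : (String × String × String) × Int) :
    (toLex (toLex (a.1.1, a.1.2.1), toLex (a.1.2.2, a.2))
      < toLex (toLex (b.1.1, b.1.2.1), toLex (b.1.2.2, b.2))) ↔ pvDK a < pvDK b := by
  obtain ⟨⟨u1, d1, n1⟩, i1⟩ := a; obtain ⟨⟨u2, d2, n2⟩, i2⟩ := b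
  simp only [pvDK, pvT, Prod.Lex.lt_iff, ofLex_toLex, toLex_inj, Prod.mk.injEq]
  tauto

theorem pvSD_eq (events : List (List (String × String))) :
    PySem.List.sorted2 (pvDec events)
      (fun p => toLex (p.1.1, p.1.2.1)) (fun p => toLex (p.1.2.2, p.2)) false = pvSD events := by
  rw [pvSorted2_eq]
  exact pvSortedKeyCongr _ _ pvDK pvDK_bridge

-- the split pair key of B's final sort orders exactly like pvMK after decoration
theorem pvMK_bridge (events : List (List (String × String))) (i j : Int) :
    (toLex ((PySem.Dict.mk (PySem.List.pyGetD events i [])).getD "date_iso" "9999-12-31",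
        toLex ((PySem.Dict.mk (PySem.List.pyGetD events i [])).getD "name" "", i))
      < toLex ((PySem.Dict.mk (PySem.List.pyGetD events j [])).getD "date_iso" "9999-12-31",
        toLex ((PySem.Dict.mk (PySem.List.pyGetD events j [])).getD "name" "", j)))
    ↔ pvMK (pvGev events i) < pvMK (pvGev events j) := by
  simp only [pvMK, pvGev, pvS, pvEv, Prod.Lex.lt_iff, ofLex_toLex, toLex_inj, Prod.mk.injEq]
  tauto

theorem pvRepsSort_eq (events : List (List (String × String))) (xs : List Int) :
    PySem.List.sorted2 xs
      (fun i => (PySem.Dict.mk (PySem.List.pyGetD events i [])).getD "date_iso" "9999-12-31")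
      (fun i => toLex ((PySem.Dict.mk (PySem.List.pyGetD events i [])).getD "name" "", i)) false
    = PySem.List.sorted xs (fun i => pvMK (pvGev events i)) false := by
  rw [pvSorted2_eq]
  exact pvSortedKeyCongr _ _ _ (pvMK_bridge events)

theorem pvSD_pairwise (events : List (List (String × String))) :
    (pvSD events).Pairwise (fun a b => pvDK a < pvDK b) := by
  apply pvPairwiseLt pvDK (fun p => p.2)
  · intro a b h
    unfold pvDK at h
    exact congrArg (fun x => x.2) (toLex.injective h)
  · exact PySem.List.sorted_pairwise _ _
  · refine ((PySem.List.sorted_perm (pvDec events) pvDK false).map _).nodup_iff.mpr ?_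
    unfold pvDec
    rw [List.map_map]
    rw [show ((fun p : (String × String × String) × Int => p.2) ∘
        (fun p : Int × List (String × String) => (pvK p.2, p.1))) = (fun p => p.1) from rfl]
    rw [PySem.List.map_fst_enumerate]
    exact PySem.List.nodup_pyRange_one _ _

-- B's kept representatives are (a permutation of) the min-index entries
theorem pvReps_perm (events : List (List (String × String))) :
    (pvReps events).Perm ((pvG events).map (fun p => p.1)) := by
  have hdecfilter : (pvDec events).filter (pvCdec events)
      = (pvG events).map (fun p => (pvK p.2, p.1)) := by
    unfold pvDec pvCdec pvG
    rw [List.filter_map]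
    congr 1
    apply List.filter_congr
    intro p hp
    simp only [Function.comp, decide_eq_decide]
    constructor
    · intro h q hq he
      exact h (pvK q.2, q.1) (List.mem_map_of_mem hq) he
    · intro h q hq he
      obtain ⟨q', hq', rfl⟩ := List.mem_map.mp hq
      exact h q' hq' he
  unfold pvReps
  refine (((PySem.List.sorted_perm (pvDec events) pvDK false).filter (pvCdec events)).map _).trans ?_
  rw [hdecfilter, List.map_map]
  exact List.Perm.refl _

theorem pvGev_on_pvG (events : List (List (String × String))) :
    ((pvG events).map (fun p => p.1)).map (pvGev events) = pvG events := by
  rw [List.map_map]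
  have h : ∀ p ∈ pvG events, pvGev events p.1 = p := by
    intro p hp
    have hpE : p ∈ PySem.List.enumerate events 0 := List.mem_of_mem_filter hp
    obtain ⟨k, hk, rfl⟩ := (PySem.List.mem_enumerate_iff _ _ _).mp hpE
    unfold pvGev pvEv
    simp only [zero_add]
    rw [PySem.List.pyGetD_natCast, List.getD_eq_getElem _ _ hk]
  calc ((pvG events).map (fun p => pvGev events p.1))
      = (pvG events).map id := List.map_congr_left h
    _ = pvG events := List.map_id _

theorem pvM_pairwise (events : List (List (String × String))) :
    (PySem.List.sorted (pvG events) pvMK false).Pairwise (fun a b => pvMK a < pvMK b) := by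
  apply pvPairwiseLt pvMK (fun p => p.1)
  · intro a b h
    unfold pvMK at h
    exact congrArg (fun x => x.2) (toLex.injective h)
  · exact PySem.List.sorted_pairwise _ _
  · refine ((PySem.List.sorted_perm (pvG events) pvMK false).map _).nodup_iff.mpr ?_
    refine ((List.filter_sublist).map _).nodup ?_
    rw [PySem.List.map_fst_enumerate]
    exact PySem.List.nodup_pyRange_one _ _

theorem pvB_eq (events : List (List (String × String))) :
    dedupe_sort_events_alt events
      = (PySem.List.sorted (pvG events) pvMK false).map (fun p => p.2) := by
  show (PySem.List.sorted2
      ((PySem.List.sorted2 (pvDec events)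
          (fun p => toLex (p.1.1, p.1.2.1)) (fun p => toLex (p.1.2.2, p.2)) false).foldl
        (fun (st : List Int × Option (String × String × String)) p =>
          if st.2 ≠ some p.1 then (st.1 ++ [p.2], some p.1) else st) ([], none)).1
      (fun i => (PySem.Dict.mk (PySem.List.pyGetD events i [])).getD "date_iso" "9999-12-31")
      (fun i => toLex ((PySem.Dict.mk (PySem.List.pyGetD events i [])).getD "name" "", i)) false).map (pvEv events)
    = (PySem.List.sorted (pvG events) pvMK false).map (fun p => p.2)
  rw [pvSD_eq, pvRepsSort_eq]
  have hscan := pvScan (pvSD events) (pvSD_pairwise events) [] (pvSD events) rfl []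
  simp only [List.getLast?_nil, Option.map_none, List.nil_append] at hscan
  rw [hscan]
  have hfc : (pvSD events).filter (fun p => decide (∀ q ∈ pvSD events, q.1 = p.1 → p.2 ≤ q.2))
      = (pvSD events).filter (pvCdec events) := by
    apply List.filter_congr
    intro p hp
    unfold pvCdec pvSD
    simp only [decide_eq_decide]
    constructor
    · intro h q hq he
      exact h q ((PySem.List.mem_sorted _ _ _ _).mpr hq) he
    · intro h q hq he
      exact h q ((PySem.List.mem_sorted _ _ _ _).mp hq) he
  rw [hfc]
  have hM : PySem.List.sorted ((pvReps events).map (pvGev events)) pvMK false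
      = PySem.List.sorted (pvG events) pvMK false := by
    apply PySem.List.sorted_eq_of_perm_of_pairwise_lt
    · refine (PySem.List.sorted_perm (pvG events) pvMK false).trans ?_
      refine ((pvGev_on_pvG events) ▸ ((pvReps_perm events).map (pvGev events))).symm
    · exact pvM_pairwise events
  calc (PySem.List.sorted (pvReps events) (fun i => pvMK (pvGev events i)) false).map (pvEv events)
      = ((PySem.List.sorted (pvReps events) (fun i => pvMK (pvGev events i)) false).map (pvGev events)).map (fun p => p.2) := by
        rw [List.map_map]; rfl
    _ = (PySem.List.sorted ((pvReps events).map (pvGev events)) pvMK false).map (fun p => p.2) := by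
        rw [pvSorted_map]
    _ = (PySem.List.sorted (pvG events) pvMK false).map (fun p => p.2) := by rw [hM]

-- ===== VERDICT (by name: the statement is the Claim_ definition above) =====
theorem dedupe_sort_events_spec : Claim_equal_dedupe_sort_events := by
  intro events _hDom
  unfold Spec_dedupe_sort_events
  rw [pvA_eq, pvB_eq]
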